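-- pv_equiv track=rewrite | github.com/fabrizzio-gz/project-euler | p107.py | only_shortest_path
-- ===== SOURCE A (Python) =====
-- def only_shortest_path(network):
--     """Keeps only minimal value on each row"""
--     result_network = []
--     for row in network:
--         new_row = []
--         min_val = min(row)
--         only_one = True
--         for value in row:
--             if value == min_val and only_one:
--                 new_row.append(value)
--                 only_one = False
--             else:
--                 new_row.append(0)
--         result_network.append(new_row)
--     return result_network
-- ===== SOURCE B (Python) =====
-- def only_shortest_path(network):
--     """Keeps only minimal value on each row"""
--     def mask(row):
--         # returns (masked_row, minimum) by recursion on the row's tail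
--         head, rest = row[0], row[1:]
--         if not rest:
--             return [head], head
--         mrest, m = mask(rest)
--         if head <= m:
--             return [head] + [0] * len(rest), head
--         return [0] + mrest, m
--     return [mask(row)[0] for row in network]
-- ===== Notes on version B (the rewrite author's own statement) =====
-- stated objective: alternative
-- what changed: Replaces A's min()-then-flagged-scan per row by a single back-to-front structural recursion that returns (masked suffix, suffix minimum) and, when the head is <= the suffix minimum, keeps the head and zeroes the whole suffix; no min(), no flag, no index lookup.
import Mathlib
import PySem

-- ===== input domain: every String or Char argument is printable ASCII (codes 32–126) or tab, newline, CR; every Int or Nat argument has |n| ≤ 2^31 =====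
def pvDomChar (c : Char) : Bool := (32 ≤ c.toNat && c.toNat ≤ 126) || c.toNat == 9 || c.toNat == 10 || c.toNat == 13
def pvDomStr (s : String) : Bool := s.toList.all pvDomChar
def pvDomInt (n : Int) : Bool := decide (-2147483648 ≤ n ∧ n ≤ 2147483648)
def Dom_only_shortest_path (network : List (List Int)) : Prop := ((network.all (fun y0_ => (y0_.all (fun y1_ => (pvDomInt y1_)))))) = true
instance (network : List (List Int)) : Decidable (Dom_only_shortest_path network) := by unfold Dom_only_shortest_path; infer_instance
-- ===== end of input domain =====

-- B replaces A's min()-then-flagged-scan per row by one back-to-front recursion returning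
-- (masked suffix, suffix minimum); a genuinely different decomposition, same kind of cost.

-- ===== PORT A =====
-- one iteration of A's outer loop: scan the row carrying (new_row, only_one)
def aStep (result_network : List (List Int)) (row : List Int) : List (List Int) :=
  match PySem.List.min? row (fun x => x) with
  | none => result_network   -- min([]) raises ValueError; excluded by Pre_
  | some min_val =>
    let st := row.foldl (fun (st : List Int × Bool) value =>
      if value = min_val ∧ st.2 then (st.1 ++ [value], false) else (st.1 ++ [0], st.2))
      ([], true)
    result_network ++ [st.1]

def only_shortest_path (network : List (List Int)) : List (List Int) :=
  network.foldl aStep []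

-- ===== PORT B =====
-- B's recursive helper mask(row): (masked_row, minimum); row[0] on [] raises, excluded by Pre_
def maskRow : List Int → List Int × Int
  | [] => ([], 0)            -- unreachable under Pre_ (Python raises IndexError on row[0])
  | [x] => ([x], x)
  | x :: y :: t =>
    let p := maskRow (y :: t)
    if x ≤ p.2 then (x :: List.replicate (y :: t).length 0, x)
    else (0 :: p.1, p.2)

def only_shortest_path_alt (network : List (List Int)) : List (List Int) :=
  network.map (fun row => (maskRow row).1)

-- ===== PRECONDITION & SPEC =====
-- A raises ValueError (min of empty sequence) on any empty row; Pre_ excludes exactly those inputs.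
def Pre_only_shortest_path (network : List (List Int)) : Prop :=
  ∀ row ∈ network, row ≠ []
instance (network : List (List Int)) : Decidable (Pre_only_shortest_path network) := by
  unfold Pre_only_shortest_path; infer_instance
def pvWitness_only_shortest_path : List (List Int) := [[3, 1, 2, 1], [5], [0, 0]]

def Spec_only_shortest_path (network : List (List Int)) (out : List (List Int)) : Prop := out = only_shortest_path_alt network
instance (network : List (List Int)) (out : List (List Int)) : Decidable (Spec_only_shortest_path network out) := by unfold Spec_only_shortest_path; infer_instance

-- ===== CLAIM (what is proved, stated in full; the proofs are below) =====
def Claim_equal_only_shortest_path : Prop := ∀ (network : List (List Int)), Dom_only_shortest_path network → Pre_only_shortest_path network → Spec_only_shortest_path network (only_shortest_path network)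

-- ===== LEMMAS AND PROOFS =====

-- B's minimum component really is a member of the (nonempty) row
lemma maskRow_snd_mem : ∀ (l : List Int), l ≠ [] → (maskRow l).2 ∈ l := by
  intro l
  induction l with
  | nil => simp
  | cons x t ih =>
    intro _
    cases t with
    | nil => simp [maskRow]
    | cons y s =>
      simp only [maskRow]
      split_ifs with h
      · simp
      · exact List.mem_cons_of_mem _ (ih (by simp))

-- characterization of B's helper on a decomposed row: first minimum kept, rest zero
lemma maskRow_spec (pre suf : List Int) (m : Int)
    (hpre : ∀ y ∈ pre, m < y) (hsuf : ∀ y ∈ suf, m ≤ y) :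
    maskRow (pre ++ m :: suf)
      = (List.replicate pre.length 0 ++ m :: List.replicate suf.length 0, m) := by
  induction pre with
  | nil =>
    simp only [List.nil_append, List.replicate, List.length_nil]
    cases suf with
    | nil => simp [maskRow]
    | cons y s =>
      simp only [maskRow]
      have hmem : (maskRow (y :: s)).2 ∈ y :: s := maskRow_snd_mem _ (by simp)
      rw [if_pos (hsuf _ hmem)]
  | cons a pre' ih =>
    have hrec := ih (fun y hy => hpre y (by simp [hy]))
    have hne : (pre' ++ m :: suf) ≠ [] := by simp
    cases hdec : pre' ++ m :: suf with
    | nil => exact absurd hdec hne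
    | cons z zs =>
      simp only [List.cons_append, hdec, maskRow]
      rw [← hdec, hrec]
      rw [if_neg (by simpa using not_le.mpr (hpre a (by simp)))]
      simp [List.replicate_succ]

-- A's inner loop after the minimum was taken: everything becomes 0
lemma scan_false (m : Int) (l : List Int) (acc : List Int) :
    l.foldl (fun (st : List Int × Bool) value =>
        if value = m ∧ st.2 then (st.1 ++ [value], false) else (st.1 ++ [0], st.2))
      (acc, false)
    = (acc ++ List.replicate l.length 0, false) := by
  induction l generalizing acc with
  | nil => simp
  | cons x t ih =>
    simp only [List.foldl_cons, List.length_cons]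
    rw [if_neg (by simp)]
    rw [ih]
    simp [List.replicate_succ, List.append_assoc]

-- A's inner loop before the minimum is met (m not in l): everything becomes 0, flag stays true
lemma scan_true (m : Int) (l : List Int) (acc : List Int) (h : m ∉ l) :
    l.foldl (fun (st : List Int × Bool) value =>
        if value = m ∧ st.2 then (st.1 ++ [value], false) else (st.1 ++ [0], st.2))
      (acc, true)
    = (acc ++ List.replicate l.length 0, true) := by
  induction l generalizing acc with
  | nil => simp
  | cons x t ih =>
    simp only [List.mem_cons, not_or] at h
    simp only [List.foldl_cons, List.length_cons]
    rw [if_neg (by simp [Ne.symm h.1])]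
    rw [ih _ h.2]
    simp [List.replicate_succ, List.append_assoc]

-- per-row agreement: A's scan produces exactly B's masked row, for a nonempty row
lemma step_eq (acc : List (List Int)) (row : List Int) (hrow : row ≠ []) :
    aStep acc row = acc ++ [(maskRow row).1] := by
  obtain ⟨m, hm⟩ : ∃ m, PySem.List.min? row (fun x => x) = some m := by
    cases h : PySem.List.min? row (fun x => x) with
    | none => exact absurd ((PySem.List.min?_eq_none_iff _ _).mp h) hrow
    | some m => exact ⟨m, rfl⟩
  have hmem : m ∈ row := PySem.List.min?_mem hm
  have hmin : ∀ y ∈ row, m ≤ y := fun y hy => PySem.List.min?_isMin hm y hy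
  obtain ⟨i, hi⟩ : ∃ i, PySem.List.index? row m = some i := by
    cases h : PySem.List.index? row m with
    | none => exact absurd hmem ((PySem.List.index?_eq_none_iff _ _).mp h)
    | some i => exact ⟨i, rfl⟩
  obtain ⟨pre, suf, hdecomp, hlen, hpre⟩ := (PySem.List.index?_eq_some_iff _ _ _).mp hi
  simp only [aStep, hm]
  subst hdecomp
  -- A's scan over pre ++ m :: suf
  rw [List.foldl_append, scan_true m pre [] hpre, List.foldl_cons]
  rw [if_pos (by simp)]
  rw [scan_false]
  -- B's recursion on the same decomposition
  rw [maskRow_spec pre suf m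
    (fun y hy => lt_of_le_of_ne (hmin y (by simp [hy])) (fun h => hpre (h ▸ hy)))
    (fun y hy => hmin y (by simp [hy]))]
  simp

-- the fold over rows agrees with the map once every row is nonempty
lemma fold_eq (rows : List (List Int)) (h : ∀ r ∈ rows, r ≠ []) (acc : List (List Int)) :
    rows.foldl aStep acc = acc ++ rows.map (fun row => (maskRow row).1) := by
  induction rows generalizing acc with
  | nil => simp
  | cons r t ih =>
    simp only [List.foldl_cons, List.map_cons]
    rw [step_eq acc r (h r (by simp))]
    rw [ih (fun r hr => h r (by simp [hr]))]
    simp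

-- ===== VERDICT (by name: the statement is the Claim_ definition above) =====
theorem only_shortest_path_spec : Claim_equal_only_shortest_path := by
  intro network _ hpre
  unfold Spec_only_shortest_path only_shortest_path only_shortest_path_alt
  simpa using fold_eq network hpre []
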